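-- pv_equiv track=rewrite | github.com/Neonidas/hierarchical-sexism-classification | utils/myutils_analysis.py | find_confusion_matrix_lists
-- ===== SOURCE A (Python) =====
-- def find_confusion_matrix_lists(true_labels, predicted_labels, data, category=1):
--     """
--     Takes a list of true labels, a list of predicted_labels, the data and optionally a category and
--     puts the data into its correct new list, that is either true positive(TP), true negative(TN),
--     false positive(FP) or false negative(FN). It returns these 4 lists
--     """
--     true_positives = []
--     true_negatives = []
--     false_positives = []
--     false_negatives = []
--
--     for i in range(len(predicted_labels)):
--         if predicted_labels[i] == category:
--             if predicted_labels[i] == true_labels[i]: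
--                 true_positives.append(data[i])
--             else:
--                 false_positives.append(data[i])
--         elif true_labels[i] == category:
--             false_negatives.append(data[i])
--         else:
--             true_negatives.append(data[i])
--     return true_positives, true_negatives, false_positives, false_negatives
-- ===== SOURCE B (Python) =====
-- def find_confusion_matrix_lists(true_labels, predicted_labels, data, category=1):
--     """Partition data into (TP, TN, FP, FN) by four filtering passes over the
--     zipped (predicted, true, data) triples instead of one index loop."""
--     triples = list(zip(predicted_labels, true_labels, data))
--     true_positives = [d for p, t, d in triples if p == category and t == category]
--     true_negatives = [d for p, t, d in triples if p != category and t != category]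
--     false_positives = [d for p, t, d in triples if p == category and t != category]
--     false_negatives = [d for p, t, d in triples if p != category and t == category]
--     return true_positives, true_negatives, false_positives, false_negatives
-- ===== Notes on version B (the rewrite author's own statement) =====
-- stated objective: idiomatic
-- what changed: A makes one indexed pass with a four-way branch appending into shared accumulators; B zips the three sequences once and builds each of the four lists with its own filtering comprehension (no indexing, no branch chain).
import Mathlib
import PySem

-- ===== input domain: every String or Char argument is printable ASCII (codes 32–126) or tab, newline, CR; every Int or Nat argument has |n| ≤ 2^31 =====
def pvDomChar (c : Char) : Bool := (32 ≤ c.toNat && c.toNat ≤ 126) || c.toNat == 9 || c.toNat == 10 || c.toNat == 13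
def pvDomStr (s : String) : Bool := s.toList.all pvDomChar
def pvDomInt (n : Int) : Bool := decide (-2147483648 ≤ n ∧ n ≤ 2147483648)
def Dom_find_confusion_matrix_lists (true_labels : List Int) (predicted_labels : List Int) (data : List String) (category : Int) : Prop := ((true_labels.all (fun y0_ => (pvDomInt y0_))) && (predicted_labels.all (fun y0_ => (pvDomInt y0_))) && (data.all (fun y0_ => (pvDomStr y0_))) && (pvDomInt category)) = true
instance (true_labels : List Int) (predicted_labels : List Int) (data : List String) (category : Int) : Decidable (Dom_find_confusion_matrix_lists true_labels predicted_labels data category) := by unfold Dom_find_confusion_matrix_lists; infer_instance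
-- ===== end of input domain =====

-- B replaces A's indexed loop with a four-way branch by four filtering passes
-- over the zipped (predicted, true, data) triples; equal on Pre_ (no IndexError).


-- ===== PORT A =====
-- loop body of A, one step per index i (Pre_ guarantees every pyGet? is some)
def pvStepA (true_labels : List Int) (predicted_labels : List Int) (data : List String) (category : Int)
    (acc : List String × List String × List String × List String) (i : Int) :
    List String × List String × List String × List String :=
  let p := (PySem.List.pyGet? predicted_labels i).getD 0
  let t := (PySem.List.pyGet? true_labels i).getD 0
  let d := (PySem.List.pyGet? data i).getD ""
  if p = category then
    if p = t then (acc.1 ++ [d], acc.2.1, acc.2.2.1, acc.2.2.2)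
    else (acc.1, acc.2.1, acc.2.2.1 ++ [d], acc.2.2.2)
  else if t = category then (acc.1, acc.2.1, acc.2.2.1, acc.2.2.2 ++ [d])
  else (acc.1, acc.2.1 ++ [d], acc.2.2.1, acc.2.2.2)

def find_confusion_matrix_lists (true_labels : List Int) (predicted_labels : List Int) (data : List String) (category : Int) : List String × List String × List String × List String :=
  (PySem.List.pyRange 0 (predicted_labels.length : Int) 1).foldl
    (pvStepA true_labels predicted_labels data category) ([], [], [], [])

-- ===== PORT B =====
def find_confusion_matrix_lists_alt (true_labels : List Int) (predicted_labels : List Int) (data : List String) (category : Int) : List String × List String × List String × List String :=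
  let triples := predicted_labels.zip (true_labels.zip data)
  ((triples.filter (fun x => x.1 == category && x.2.1 == category)).map (fun x => x.2.2),
   (triples.filter (fun x => x.1 != category && x.2.1 != category)).map (fun x => x.2.2),
   (triples.filter (fun x => x.1 == category && x.2.1 != category)).map (fun x => x.2.2),
   (triples.filter (fun x => x.1 != category && x.2.1 == category)).map (fun x => x.2.2))

-- ===== PRECONDITION & SPEC =====
-- A indexes true_labels[i] and data[i] for every i < len(predicted_labels); it raises IndexError otherwise.
def Pre_find_confusion_matrix_lists (true_labels : List Int) (predicted_labels : List Int) (data : List String) (category : Int) : Prop :=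
  predicted_labels.length ≤ true_labels.length ∧ predicted_labels.length ≤ data.length
instance (true_labels : List Int) (predicted_labels : List Int) (data : List String) (category : Int) : Decidable (Pre_find_confusion_matrix_lists true_labels predicted_labels data category) := by unfold Pre_find_confusion_matrix_lists; infer_instance
def pvWitness_find_confusion_matrix_lists : List Int × List Int × List String × Int := ([1, 0, 1], [1, 1, 0], ["a", "b", "c"], 1)

def Spec_find_confusion_matrix_lists (true_labels : List Int) (predicted_labels : List Int) (data : List String) (category : Int) (out : List String × List String × List String × List String) : Prop := out = find_confusion_matrix_lists_alt true_labels predicted_labels data category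
instance (true_labels : List Int) (predicted_labels : List Int) (data : List String) (category : Int) (out : List String × List String × List String × List String) : Decidable (Spec_find_confusion_matrix_lists true_labels predicted_labels data category out) := by unfold Spec_find_confusion_matrix_lists; infer_instance

-- ===== CLAIM (what is proved, stated in full; the proofs are below) =====
def Claim_equal_find_confusion_matrix_lists : Prop := ∀ (true_labels : List Int) (predicted_labels : List Int) (data : List String) (category : Int), Dom_find_confusion_matrix_lists true_labels predicted_labels data category → Pre_find_confusion_matrix_lists true_labels predicted_labels data category → Spec_find_confusion_matrix_lists true_labels predicted_labels data category (find_confusion_matrix_lists true_labels predicted_labels data category)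
-- ===== LEMMAS AND PROOFS =====

-- the same step, read off a zipped triple instead of three indexed lookups
def pvStepZ (category : Int) (acc : List String × List String × List String × List String)
    (x : Int × Int × String) : List String × List String × List String × List String :=
  if x.1 = category then
    if x.1 = x.2.1 then (acc.1 ++ [x.2.2], acc.2.1, acc.2.2.1, acc.2.2.2)
    else (acc.1, acc.2.1, acc.2.2.1 ++ [x.2.2], acc.2.2.2)
  else if x.2.1 = category then (acc.1, acc.2.1, acc.2.2.1, acc.2.2.2 ++ [x.2.2])
  else (acc.1, acc.2.1 ++ [x.2.2], acc.2.2.1, acc.2.2.2)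

lemma pvFoldA_eq_foldZ (true_labels predicted_labels : List Int) (data : List String) (category : Int)
    (h1 : predicted_labels.length ≤ true_labels.length)
    (h2 : predicted_labels.length ≤ data.length) :
    ∀ (n : Nat), n ≤ predicted_labels.length →
    ∀ acc, (PySem.List.pyRange 0 (n : Int) 1).foldl
        (pvStepA true_labels predicted_labels data category) acc
      = ((predicted_labels.zip (true_labels.zip data)).take n).foldl (pvStepZ category) acc := by
  intro n
  induction n with
  | zero => intro _ acc; simp [PySem.List.pyRange]
  | succ m ih =>
    intro hm acc
    have hmlt : m < predicted_labels.length := hm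
    have hz : m < (predicted_labels.zip (true_labels.zip data)).length := by
      simp [List.length_zip]; omega
    have : ((m : Int) + 1) = ((m + 1 : Nat) : Int) := by push_cast; ring
    rw [show ((m + 1 : Nat) : Int) = (m : Int) + 1 by push_cast; ring,
        PySem.List.pyRange_one_succ_right (by omega),
        List.foldl_append,
        ih (by omega) acc,
        List.take_add_one, List.getElem?_eq_getElem hz]
    simp only [Option.toList, List.foldl_append, List.foldl_cons, List.foldl_nil]
    have hpm : m < true_labels.length := by omega
    have hdm : m < data.length := by omega
    simp [pvStepA, pvStepZ, hmlt, hpm, hdm, List.getElem_zip]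

lemma pvFoldZ_filter (category : Int) :
    ∀ (l : List (Int × Int × String)) (tp tn fp fn : List String),
    l.foldl (pvStepZ category) (tp, tn, fp, fn)
      = (tp ++ (l.filter (fun x => x.1 == category && x.2.1 == category)).map (fun x => x.2.2),
         tn ++ (l.filter (fun x => x.1 != category && x.2.1 != category)).map (fun x => x.2.2),
         fp ++ (l.filter (fun x => x.1 == category && x.2.1 != category)).map (fun x => x.2.2),
         fn ++ (l.filter (fun x => x.1 != category && x.2.1 == category)).map (fun x => x.2.2)) := by
  intro l
  induction l with
  | nil => simp
  | cons x xs ih =>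
    intro tp tn fp fn
    obtain ⟨p, t, d⟩ := x
    by_cases hp : p = category <;> by_cases ht : t = category
    · simp [pvStepZ, hp, ht, ih]
    · simp [pvStepZ, hp, ht, Ne.symm ht, ih]
    · simp [pvStepZ, hp, ht, ih]
    · simp [pvStepZ, hp, ht, ih]

-- ===== VERDICT (by name: the statement is the Claim_ definition above) =====
theorem find_confusion_matrix_lists_spec : Claim_equal_find_confusion_matrix_lists := by
  intro true_labels predicted_labels data category _ hpre
  have h1 := hpre.1
  have h2 := hpre.2
  unfold Spec_find_confusion_matrix_lists find_confusion_matrix_lists find_confusion_matrix_lists_alt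
  rw [pvFoldA_eq_foldZ true_labels predicted_labels data category h1 h2
      predicted_labels.length le_rfl ([], [], [], [])]
  have htake : (predicted_labels.zip (true_labels.zip data)).take predicted_labels.length
      = predicted_labels.zip (true_labels.zip data) := by
    apply List.take_of_length_le
    simp only [List.length_zip]
    omega
  rw [htake, pvFoldZ_filter]
  simp
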